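-- pv_equiv track=rewrite | github.com/simo1209/tues_homework | 24/week10/homework/change.py | split_change
-- ===== SOURCE A (Python) =====
-- def split_change(change):
--     bills=[5,2,1]
--     current_change=change
--     bills_needed=[]
--
--     for bill in bills:
--         bills_needed.append(current_change//bill)
--         current_change=current_change%bill
--     return bills_needed
-- ===== SOURCE B (Python) =====
-- # Table-driven: the last two counts depend only on change % 5, so look them up;
-- # the number of fives is the exact quotient (change - r) / 5.
-- _TAIL = [(0, 0), (0, 1), (1, 0), (1, 1), (2, 0)]
--
-- def split_change(change):
--     r = change % 5
--     twos, ones = _TAIL[r]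
--     return [(change - r) // 5, twos, ones]
-- ===== Notes on version B (the rewrite author's own statement) =====
-- stated objective: alternative
-- what changed: Replaced the greedy divmod loop with a precomputed lookup table, indexed by the residue of change modulo the largest denomination, for the counts of the two smaller bills, plus one exact division for the count of the largest bill.
import Mathlib
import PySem

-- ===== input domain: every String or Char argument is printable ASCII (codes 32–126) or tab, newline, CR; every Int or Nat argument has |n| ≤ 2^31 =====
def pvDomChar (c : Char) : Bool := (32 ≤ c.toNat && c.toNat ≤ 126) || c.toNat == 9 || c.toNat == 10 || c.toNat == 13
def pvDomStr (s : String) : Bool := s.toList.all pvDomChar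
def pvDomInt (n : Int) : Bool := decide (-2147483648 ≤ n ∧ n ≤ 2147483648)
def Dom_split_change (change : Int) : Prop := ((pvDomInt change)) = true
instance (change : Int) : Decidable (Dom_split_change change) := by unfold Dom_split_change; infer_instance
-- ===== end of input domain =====

-- B replaces A's greedy divmod loop by a residue-mod-5 lookup table plus one exact division (alternative).

-- ===== PORT A =====
-- literal port: fold over the bills list carrying (current_change, bills_needed)
def split_change (change : Int) : List Int :=
  let bills : List Int := [5, 2, 1]
  let st := bills.foldl (fun (st : Int × List Int) bill =>
    (PySem.Int.mod st.1 bill, st.2 ++ [PySem.Int.floordiv st.1 bill])) (change, [])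
  st.2

-- ===== PORT B =====
-- table of (twos, ones) indexed by change % 5; the .getD is a totality guard only
-- (r = change % 5 is always in range, as Python's indexing would require)
def split_change_alt (change : Int) : List Int :=
  let tail : List (Int × Int) := [(0, 0), (0, 1), (1, 0), (1, 1), (2, 0)]
  let r := PySem.Int.mod change 5
  let t := (PySem.List.pyGet? tail r).getD (0, 0)
  [PySem.Int.floordiv (change - r) 5, t.1, t.2]

-- ===== PRECONDITION & SPEC =====
def Spec_split_change (change : Int) (out : List Int) : Prop := out = split_change_alt change
instance (change : Int) (out : List Int) : Decidable (Spec_split_change change out) := by unfold Spec_split_change; infer_instance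

-- ===== CLAIM (what is proved, stated in full; the proofs are below) =====
def Claim_equal_split_change : Prop := ∀ (change : Int), Dom_split_change change → Spec_split_change change (split_change change)

-- ===== LEMMAS AND PROOFS =====

-- ===== VERDICT (by name: the statement is the Claim_ definition above) =====
theorem split_change_spec : Claim_equal_split_change := by
  intro change _
  unfold Spec_split_change split_change split_change_alt
  have hr0 : 0 ≤ change % 5 := Int.emod_nonneg _ (by norm_num)
  have hr5 : change % 5 < 5 := Int.emod_lt_of_pos _ (by norm_num)
  have h5 : PySem.Int.mod change 5 = change % 5 := by
    simp [PySem.Int.mod, Int.fmod_eq_emod]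
  rw [h5]
  obtain ⟨r, hre, hr0', hr5'⟩ : ∃ r : Int, change % 5 = r ∧ 0 ≤ r ∧ r < 5 :=
    ⟨change % 5, rfl, hr0, hr5⟩
  rw [hre]
  interval_cases r <;>
    simp_all [List.foldl, PySem.List.pyGet?, PySem.List.pyIdx?,
      PySem.Int.mod, PySem.Int.floordiv, Int.fdiv_eq_ediv, Int.fmod_eq_emod] <;>
    omega
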